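-- pv_equiv track=rewrite | github.com/uanonj/uw-math480-final | src/predictor/decision_tree.py | most_common_label
-- ===== SOURCE A (Python) =====
-- import collections
--
-- def example_target_value(example):
--     """Returns the target value of the given example."""
--     return example[len(example)]
--
-- def most_common_label(examples):
--     """Returns the most common target label among the examples"""
--     count = collections.Counter()
--     for example in examples:
--         count[example_target_value(example)] += 1
--     max_label_count = -1
--     max_label = None
--     for label in count:
--         if count[label] > max_label_count:
--             max_label_count = count[label]
--             max_label = label
--     return max_label
-- ===== SOURCE B (Python) =====
-- def example_target_value(example):
--     """Returns the target value of the given example."""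
--     return example[len(example)]
--
-- def most_common_label(examples):
--     """Returns the most common target label among the examples"""
--     labels = [example_target_value(e) for e in examples]
--
--     def best(ls):
--         # recursively: count the first label by removing all its occurrences,
--         # recurse on what is left, keep the earlier label on ties
--         if not ls:
--             return None, 0
--         head = ls[0]
--         rest = [x for x in ls if x != head]
--         cnt = len(ls) - len(rest)
--         bl, bc = best(rest)
--         return (head, cnt) if cnt >= bc else (bl, bc)
--
--     return best(labels)[0]
-- ===== Notes on version B (the rewrite author's own statement) =====
-- stated objective: alternative
-- what changed: B replaces A's one-pass Counter plus strict-max scan over keys with a recursive selection that uses no dictionary at all: it counts the first label by filtering out its occurrences, recurses on the remaining labels, and keeps the earlier label on ties (>=), which reproduces A's first-occurrence tie-break.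
import Mathlib
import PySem

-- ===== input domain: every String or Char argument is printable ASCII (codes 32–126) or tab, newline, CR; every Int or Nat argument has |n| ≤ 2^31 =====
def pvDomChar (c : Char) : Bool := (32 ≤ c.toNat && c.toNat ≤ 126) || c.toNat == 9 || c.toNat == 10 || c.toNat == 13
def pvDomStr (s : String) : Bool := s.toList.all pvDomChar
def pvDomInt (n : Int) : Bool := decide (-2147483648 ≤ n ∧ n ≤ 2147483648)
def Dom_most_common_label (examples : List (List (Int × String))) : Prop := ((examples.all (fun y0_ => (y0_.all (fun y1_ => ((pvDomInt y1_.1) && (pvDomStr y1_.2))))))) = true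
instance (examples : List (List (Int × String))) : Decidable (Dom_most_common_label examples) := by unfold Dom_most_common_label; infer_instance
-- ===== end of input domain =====

-- ===== PORT A =====
-- B replaces A's Counter + strict-max key scan by a recursive remove-and-recurse selection with no dictionary; return values agree on Pre_.
-- example_target_value(example) = example[len(example)] on the dict; none = Python's KeyError (excluded by Pre_).
def exampleTargetValue (ex : List (Int × String)) : Option String :=
  let d := PySem.Dict.ofList ex
  d.get? ((d.size : Int))

def most_common_label (examples : List (List (Int × String))) : Option String :=
  let count := examples.foldl
    (fun c ex =>
      match exampleTargetValue ex with
      | some v => c.modify v 0 (· + 1)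
      | none => c)   -- unreachable under Pre_: Python raises KeyError here
    PySem.Dict.empty
  (count.keys.foldl
    (fun (p : Int × Option String) label =>
      if count.getD label 0 > p.1 then (count.getD label 0, some label) else p)
    ((-1 : Int), (none : Option String))).2

-- ===== PORT B =====
-- Source B's inner 'best': count the head label by filtering its occurrences out, recurse on the rest, keep the earlier label on ties.
def bestRec (ls : List String) : Option String × Int :=
  match ls with
  | [] => (none, 0)
  | h :: t =>
    let rest := (h :: t).filter (fun x => x != h)
    let cnt : Int := ((h :: t).length : Int) - (rest.length : Int)
    let p := bestRec rest
    if cnt ≥ p.2 then (some h, cnt) else p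
termination_by ls.length
decreasing_by
  simp only [List.filter_cons, bne_self_eq_false, List.length_cons]
  exact Nat.lt_succ_of_le (List.length_filter_le _ _)

-- .getD "" is unreachable under Pre_ (Python raises KeyError there).
def most_common_label_alt (examples : List (List (Int × String))) : Option String :=
  let labels := examples.map (fun ex => (exampleTargetValue ex).getD "")
  (bestRec labels).1

-- ===== PRECONDITION & SPEC =====
-- Pre_ excludes exactly the inputs on which Python A raises KeyError: an example dict missing the key len(example).
def Pre_most_common_label (examples : List (List (Int × String))) : Prop :=
  ∀ ex ∈ examples, (PySem.Dict.ofList ex).contains (((PySem.Dict.ofList ex).size : Int)) = true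
instance (examples : List (List (Int × String))) : Decidable (Pre_most_common_label examples) := by unfold Pre_most_common_label; infer_instance

def pvWitness_most_common_label : (List (List (Int × String))) := [[(1, "a")], [(1, "b")], [(1, "a")]]

def Spec_most_common_label (examples : List (List (Int × String))) (out : Option String) : Prop := out = most_common_label_alt examples
instance (examples : List (List (Int × String))) (out : Option String) : Decidable (Spec_most_common_label examples out) := by unfold Spec_most_common_label; infer_instance

-- ===== CLAIM (what is proved, stated in full; the proofs are below) =====
def Claim_equal_most_common_label : Prop := ∀ (examples : List (List (Int × String))), Dom_most_common_label examples → Pre_most_common_label examples → Spec_most_common_label examples (most_common_label examples)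

-- ===== LEMMAS AND PROOFS =====

-- Under Pre_, A's Counter loop over examples is the modify-loop over the label list.
lemma count_fold_eq (examples : List (List (Int × String)))
    (h : ∀ ex ∈ examples, (exampleTargetValue ex).isSome) (d : PySem.Dict String Int) :
    examples.foldl
      (fun c ex =>
        match exampleTargetValue ex with
        | some v => c.modify v 0 (· + 1)
        | none => c) d
    = (examples.map (fun ex => (exampleTargetValue ex).getD "")).foldl
        (fun c v => c.modify v 0 (· + 1)) d := by
  induction examples generalizing d with
  | nil => rfl
  | cons e es ih =>
    have he : (exampleTargetValue e).isSome := h e (by simp)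
    obtain ⟨v, hv⟩ := Option.isSome_iff_exists.mp he
    simp only [List.foldl, List.map, hv, Option.getD_some]
    exact ih (fun x hx => h x (by simp [hx])) _

-- the right-recursive "first maximal element with its key" selection over a (distinct) label list
def maxPair (f : String → Int) : List String → Option String × Int
  | [] => (none, 0)
  | h :: t =>
    let p := maxPair f t
    if p.2 ≤ f h then (some h, f h) else p

lemma maxPair_congr (f g : String → Int) (ks : List String)
    (h : ∀ x ∈ ks, f x = g x) : maxPair f ks = maxPair g ks := by
  induction ks with
  | nil => rfl
  | cons k t ih =>
    simp only [maxPair, ih (fun x hx => h x (by simp [hx])), h k (by simp)]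

-- elements already in the accumulator are skipped by Set.add
lemma foldl_add_skip (h : String) (t : List String) : ∀ (acc : List String), h ∈ acc →
    t.foldl PySem.Set.add acc = (t.filter (fun x => x != h)).foldl PySem.Set.add acc := by
  induction t with
  | nil => intro acc _; rfl
  | cons x t ih =>
    intro acc hacc
    by_cases hx : x = h
    · subst hx
      have : PySem.Set.add acc x = acc := by
        simp [PySem.Set.add, PySem.Set.contains, hacc]
      simp only [List.filter_cons, bne_self_eq_false, List.foldl_cons, this]
      exact ih acc hacc
    · have hb : (x != h) = true := by simp [bne, hx]
      simp only [List.filter_cons, hb, List.foldl_cons]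
      exact ih _ ((PySem.Set.mem_add acc x h).mpr (Or.inl hacc))

-- a head no later element collides with stays at the front of the fold
lemma foldl_add_cons (h : String) (s : List String) : ∀ (acc : List String), h ∉ s →
    s.foldl PySem.Set.add (h :: acc) = h :: s.foldl PySem.Set.add acc := by
  induction s with
  | nil => intro acc _; rfl
  | cons x s ih =>
    intro acc hs
    have hxh : x ≠ h := fun e => hs (by simp [e])
    have hc : PySem.Set.contains (h :: acc) x = PySem.Set.contains acc x := by
      simp [PySem.Set.contains, hxh]
    have : PySem.Set.add (h :: acc) x = h :: PySem.Set.add acc x := by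
      simp only [PySem.Set.add, hc]
      split <;> simp
    simp only [List.foldl_cons, this]
    exact ih _ (fun e => hs (by simp [e]))

-- first-occurrence dedup splits as head :: dedup of the head-free remainder
lemma ofList_cons_filter (h : String) (t : List String) :
    PySem.Set.ofList (h :: t) = h :: PySem.Set.ofList (t.filter (fun x => x != h)) := by
  have h1 : PySem.Set.ofList (h :: t) = t.foldl PySem.Set.add [h] := by
    simp [PySem.Set.ofList, PySem.Set.add, PySem.Set.empty]
  rw [h1, foldl_add_skip h t [h] (by simp)]
  have h2 : h ∉ t.filter (fun x => x != h) := by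
    intro hmem
    have := List.of_mem_filter hmem
    simp at this
  exact foldl_add_cons h _ [] h2

-- removing the head's occurrences drops exactly count-many elements
lemma filter_count_len (h : String) (l : List String) :
    (l.filter (fun x => x != h)).length + l.count h = l.length := by
  induction l with
  | nil => rfl
  | cons x t ih =>
    by_cases hx : x = h
    · subst hx
      simp
      omega
    · have hb : (x != h) = true := by simp [bne, hx]
      simp [hb, hx]
      omega

-- B's recursive selection computes maxPair over the deduped labels with counts in the full list
lemma bestRec_eq_aux : ∀ (n : Nat) (ls : List String), ls.length ≤ n →
    bestRec ls = maxPair (fun x => ((ls.count x : Int))) (PySem.Set.ofList ls) := by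
  intro n
  induction n with
  | zero =>
    intro ls hlen
    have : ls = [] := List.eq_nil_of_length_eq_zero (Nat.le_zero.mp hlen)
    subst this
    rw [bestRec]
    rfl
  | succ n ih =>
    intro ls hlen
    cases ls with
    | nil =>
      rw [bestRec]
      rfl
    | cons h t =>
      rw [bestRec.eq_def]
      dsimp only
      have hF : (h :: t).filter (fun x => x != h) = t.filter (fun x => x != h) := by
        simp
      rw [hF]
      set rest := t.filter (fun x => x != h) with hrest
      have hrlen : rest.length ≤ n := by
        rw [hrest]
        have := List.length_filter_le (fun x => x != h) t
        simp only [List.length_cons] at hlen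
        omega
      have hcnt : (((h :: t).length : Int) - (rest.length : Int)) = (((h :: t).count h : Nat) : Int) := by
        have h1 := filter_count_len h (h :: t)
        rw [hF] at h1
        simp only [List.length_cons] at *
        omega
      have hcong : ∀ x ∈ PySem.Set.ofList rest,
          ((rest.count x : Nat) : Int) = (((h :: t).count x : Nat) : Int) := by
        intro x hx
        have hxr : x ∈ rest := (PySem.Set.mem_ofList rest x).mp hx
        have hxt := List.mem_filter.mp (hrest ▸ hxr)
        have hxh : (x != h) = true := hxt.2
        have h1 : List.count x ((h :: t).filter (fun x => x != h)) = List.count x (h :: t) :=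
          List.count_filter hxh
        rw [hF] at h1
        rw [h1]
      rw [ofList_cons_filter h t, ← hrest]
      simp only [maxPair]
      rw [← maxPair_congr _ _ _ hcong, ← ih rest hrlen]
      rw [hcnt]

lemma bestRec_eq (ls : List String) :
    bestRec ls = maxPair (fun x => ((ls.count x : Int))) (PySem.Set.ofList ls) :=
  bestRec_eq_aux ls.length ls (le_refl _)

-- A's strict-max loop with a held maximum, against maxPair
lemma fold_max_inv (f : String → Int) (hf : ∀ k, 0 ≤ f k) (ks : List String) : ∀ m,
    (ks.foldl
      (fun (p : Int × Option String) k => if p.1 < f k then (f k, some k) else p)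
      (f m, some m))
    = if (maxPair f ks).2 ≤ f m then (f m, some m) else ((maxPair f ks).2, (maxPair f ks).1) := by
  induction ks with
  | nil =>
    intro m
    simp [maxPair, hf m]
  | cons h t ih =>
    intro m
    have hmp : maxPair f (h :: t) = if (maxPair f t).2 ≤ f h then (some h, f h) else maxPair f t := rfl
    rcases hq : maxPair f t with ⟨bl, bc⟩
    rw [hmp, hq]
    simp only [List.foldl_cons]
    by_cases hlt : f m < f h
    · rw [if_pos hlt, ih h, hq]
      by_cases hth : bc ≤ f h
      · rw [if_pos hth, if_pos hth]
        have : ¬ f h ≤ f m := by omega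
        rw [if_neg this]
      · rw [if_neg hth, if_neg hth]
        have : ¬ bc ≤ f m := by omega
        rw [if_neg this]
    · rw [if_neg hlt, ih m, hq]
      by_cases hth : bc ≤ f h
      · rw [if_pos hth]
        have h1 : bc ≤ f m := by omega
        have h2 : f h ≤ f m := by omega
        rw [if_pos h1, if_pos h2]
      · rw [if_neg hth]

-- A's strict-max loop from (-1, None) picks B's selection result
lemma fold_eq_maxPair (f : String → Int) (hf : ∀ k, 0 ≤ f k) (ks : List String) :
    (ks.foldl
      (fun (p : Int × Option String) k => if p.1 < f k then (f k, some k) else p)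
      ((-1 : Int), (none : Option String))).2
    = (maxPair f ks).1 := by
  cases ks with
  | nil => rfl
  | cons h t =>
    have hk : (-1 : Int) < f h := by have := hf h; omega
    simp only [List.foldl_cons, hk, if_pos]
    rw [fold_max_inv f hf t h]
    simp only [maxPair]
    by_cases hth : (maxPair f t).2 ≤ f h
    · simp [hth]
    · simp [hth]

-- ===== VERDICT (by name: the statement is the Claim_ definition above) =====
theorem most_common_label_spec : Claim_equal_most_common_label := by
  intro examples _dom hpre
  unfold Spec_most_common_label most_common_label most_common_label_alt
  dsimp only
  have hsome : ∀ ex ∈ examples, (exampleTargetValue ex).isSome := by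
    intro ex hex
    have hc := hpre ex hex
    simpa [exampleTargetValue, PySem.Dict.contains_eq_isSome_get?] using hc
  rw [count_fold_eq examples hsome]
  set labels := examples.map (fun ex => (exampleTargetValue ex).getD "") with hlab
  have hcnt : labels.foldl (fun c v => c.modify v 0 (· + 1)) PySem.Dict.empty
      = PySem.Dict.counter labels := rfl
  rw [hcnt]
  simp only [PySem.Dict.keys_counter, PySem.Dict.getD_counter, gt_iff_lt]
  rw [fold_eq_maxPair (fun l => ((labels.count l : Nat) : Int)) (fun k => Int.natCast_nonneg _)]
  rw [bestRec_eq labels]
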